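-- pv_equiv track=rewrite | github.com/Glidepath25/geoprox-api | geoprox/main.py | _normalize_site_status
-- ===== SOURCE A (Python) =====
-- from typing import Any, Dict, Iterable, List, Optional, Sequence, Set, Tuple
--
-- SITE_ASSESSMENT_STATUS_OPTIONS = [
--     ('Not started', 'Not started'),
--     ('In progress', 'In progress'),
--     ('Completed', 'Completed'),
-- ]
--
-- def _normalize_site_status(value: Optional[str]) -> str:
--     if not value:
--         return SITE_ASSESSMENT_STATUS_OPTIONS[-1][0]
--     lowered = value.strip().lower()
--     alias_map = {
--         "wip": "In progress",
--         "work in progress": "In progress",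
--         "in-progress": "In progress",
--         "in progress": "In progress",
--         "complete": "Completed",
--         "completed": "Completed",
--         "not-started": "Not started",
--     }
--     if lowered in alias_map:
--         lowered = alias_map[lowered].lower()
--     for status_value, status_label in SITE_ASSESSMENT_STATUS_OPTIONS:
--         if lowered == status_value.lower() or lowered == status_label.lower():
--             return status_value
--     return SITE_ASSESSMENT_STATUS_OPTIONS[-1][0]
-- ===== SOURCE B (Python) =====
-- _STATUS_MAP = {
--     "wip": "In progress",
--     "work in progress": "In progress",
--     "in-progress": "In progress",
--     "in progress": "In progress",
--     "complete": "Completed",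
--     "completed": "Completed",
--     "not-started": "Not started",
--     "not started": "Not started",
-- }
--
-- def _normalize_site_status(value):
--     if not value:
--         return "Completed"
--     return _STATUS_MAP.get(value.strip().lower(), "Completed")
-- ===== Notes on version B (the rewrite author's own statement) =====
-- stated objective: simpler
-- what changed: Replaces the alias-map membership test followed by a scan over the options list with a single flat dictionary lookup: every recognized lowered form is mapped directly to its canonical label, and unknown strings fall through to the default completed label.
import Mathlib
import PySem

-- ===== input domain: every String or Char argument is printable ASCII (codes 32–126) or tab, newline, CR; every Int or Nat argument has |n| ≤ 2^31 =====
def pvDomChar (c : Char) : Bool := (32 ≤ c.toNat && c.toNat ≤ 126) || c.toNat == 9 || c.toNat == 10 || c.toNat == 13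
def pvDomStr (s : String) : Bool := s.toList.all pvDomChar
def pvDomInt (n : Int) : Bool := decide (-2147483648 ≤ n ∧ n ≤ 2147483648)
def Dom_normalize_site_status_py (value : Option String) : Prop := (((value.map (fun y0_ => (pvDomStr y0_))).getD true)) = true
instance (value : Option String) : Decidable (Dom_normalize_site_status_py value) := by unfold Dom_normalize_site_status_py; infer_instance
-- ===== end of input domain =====

-- B replaces A's alias-map membership test + options-list scan by a single flat
-- dictionary lookup with "Completed" as the default (objective: simpler).
-- ===== PORT A =====
def pvSiteOptions : List (String × String) :=
  [("Not started", "Not started"), ("In progress", "In progress"), ("Completed", "Completed")]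

def pvAliasMap : PySem.Dict String String := PySem.Dict.ofList
  [("wip", "In progress"), ("work in progress", "In progress"), ("in-progress", "In progress"),
   ("in progress", "In progress"), ("complete", "Completed"), ("completed", "Completed"),
   ("not-started", "Not started")]

-- the for-loop over SITE_ASSESSMENT_STATUS_OPTIONS, with the post-loop return as base case
def pvScan (lowered : String) : List (String × String) → String
  | [] => ((PySem.List.pyGet? pvSiteOptions (-1)).getD ("", "")).1
  | (sv, sl) :: rest =>
      if lowered = PySem.Str.lower sv ∨ lowered = PySem.Str.lower sl then sv
      else pvScan lowered rest

def normalize_site_status_py (value : Option String) : String :=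
  match value with
  | none => ((PySem.List.pyGet? pvSiteOptions (-1)).getD ("", "")).1
  | some s =>
    if s = "" then ((PySem.List.pyGet? pvSiteOptions (-1)).getD ("", "")).1
    else
      let lowered := PySem.Str.lower (PySem.Str.strip s)
      let lowered := if pvAliasMap.contains lowered
                     then PySem.Str.lower (PySem.Dict.getD pvAliasMap lowered "")
                     else lowered
      pvScan lowered pvSiteOptions

-- ===== PORT B =====
def pvStatusMap : PySem.Dict String String := PySem.Dict.ofList
  [("wip", "In progress"), ("work in progress", "In progress"), ("in-progress", "In progress"),
   ("in progress", "In progress"), ("complete", "Completed"), ("completed", "Completed"),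
   ("not-started", "Not started"), ("not started", "Not started")]

def normalize_site_status_py_alt (value : Option String) : String :=
  match value with
  | none => "Completed"
  | some s =>
    if s = "" then "Completed"
    else PySem.Dict.getD pvStatusMap (PySem.Str.lower (PySem.Str.strip s)) "Completed"

-- ===== PRECONDITION & SPEC =====
def Spec_normalize_site_status_py (value : Option String) (out : String) : Prop := out = normalize_site_status_py_alt value
instance (value : Option String) (out : String) : Decidable (Spec_normalize_site_status_py value out) := by unfold Spec_normalize_site_status_py; infer_instance

-- ===== CLAIM (what is proved, stated in full; the proofs are below) =====
def Claim_equal_normalize_site_status_py : Prop := ∀ (value : Option String), Dom_normalize_site_status_py value → Spec_normalize_site_status_py value (normalize_site_status_py value)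

-- ===== LEMMAS AND PROOFS =====

-- the two lookups agree on every lowered string
theorem pv_core (l : String) :
    (pvScan (if pvAliasMap.contains l
             then PySem.Str.lower (PySem.Dict.getD pvAliasMap l "")
             else l) pvSiteOptions) = PySem.Dict.getD pvStatusMap l "Completed" := by
  by_cases h1 : l = "wip"; · subst h1; decide
  by_cases h2 : l = "work in progress"; · subst h2; decide
  by_cases h3 : l = "in-progress"; · subst h3; decide
  by_cases h4 : l = "in progress"; · subst h4; decide
  by_cases h5 : l = "complete"; · subst h5; decide
  by_cases h6 : l = "completed"; · subst h6; decide
  by_cases h7 : l = "not-started"; · subst h7; decide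
  by_cases h8 : l = "not started"; · subst h8; decide
  have ha : pvAliasMap = PySem.Dict.mk
      [("wip", "In progress"), ("work in progress", "In progress"), ("in-progress", "In progress"),
       ("in progress", "In progress"), ("complete", "Completed"), ("completed", "Completed"),
       ("not-started", "Not started")] := by decide
  have hb : pvStatusMap = PySem.Dict.mk
      [("wip", "In progress"), ("work in progress", "In progress"), ("in-progress", "In progress"),
       ("in progress", "In progress"), ("complete", "Completed"), ("completed", "Completed"),
       ("not-started", "Not started"), ("not started", "Not started")] := by decide
  have h1' : ¬("wip" = l) := fun h => h1 h.symm
  have h2' : ¬("work in progress" = l) := fun h => h2 h.symm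
  have h3' : ¬("in-progress" = l) := fun h => h3 h.symm
  have h4' : ¬("in progress" = l) := fun h => h4 h.symm
  have h5' : ¬("complete" = l) := fun h => h5 h.symm
  have h6' : ¬("completed" = l) := fun h => h6 h.symm
  have h7' : ¬("not-started" = l) := fun h => h7 h.symm
  have h8' : ¬("not started" = l) := fun h => h8 h.symm
  simp [ha, hb, pvScan, pvSiteOptions, PySem.Dict.contains, PySem.Dict.getD,
        PySem.Dict.get?, PySem.List.pyGet?, PySem.List.pyIdx?,
        show PySem.Str.lower "Not started" = "not started" from by decide,
        show PySem.Str.lower "In progress" = "in progress" from by decide,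
        show PySem.Str.lower "Completed" = "completed" from by decide,
        h4, h6, h8, h1', h2', h3', h4', h5', h6', h7', h8']

-- ===== VERDICT (by name: the statement is the Claim_ definition above) =====
theorem normalize_site_status_py_spec : Claim_equal_normalize_site_status_py := by
  intro value _
  unfold Spec_normalize_site_status_py normalize_site_status_py normalize_site_status_py_alt
  match value with
  | none => rfl
  | some s =>
    by_cases hs : s = ""
    · subst hs; decide
    · simp only [hs, if_false]
      exact pv_core (PySem.Str.lower (PySem.Str.strip s))
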